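-- pv_equiv track=rewrite | github.com/hyeonsu8241/python_study_in_summer | 11279.py | max_of
-- ===== SOURCE A (Python) =====
-- from typing import Sequence
--
-- def max_of(a: Sequence) -> int:
--     i = 0
--     k = 0
--     max = a[0]
--     for i in range(len(a)):
--         if max < a[i]:
--             max = a[i]
--             k += 1
--     return max, k
-- ===== SOURCE B (Python) =====
-- def max_of(a):
--     # Divide and conquer: rec(seg, t) folds the running-max/update-count over seg
--     # starting from threshold t; halves combine by passing the left max into the right.
--     def rec(seg, t):
--         if len(seg) == 1:
--             x = seg[0]
--             return (x, 1) if t < x else (t, 0)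
--         mid = len(seg) // 2
--         m1, k1 = rec(seg[:mid], t)
--         m2, k2 = rec(seg[mid:], m1)
--         return m2, k1 + k2
--     return rec(a, a[0])
-- ===== Notes on version B (the rewrite author's own statement) =====
-- stated objective: alternative
-- what changed: Replaced the fused left-to-right index loop with a divide-and-conquer over halves: each half returns its (max-so-far, update count) given an incoming threshold, the left half's max becomes the right half's threshold, and counts add.
import Mathlib
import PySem

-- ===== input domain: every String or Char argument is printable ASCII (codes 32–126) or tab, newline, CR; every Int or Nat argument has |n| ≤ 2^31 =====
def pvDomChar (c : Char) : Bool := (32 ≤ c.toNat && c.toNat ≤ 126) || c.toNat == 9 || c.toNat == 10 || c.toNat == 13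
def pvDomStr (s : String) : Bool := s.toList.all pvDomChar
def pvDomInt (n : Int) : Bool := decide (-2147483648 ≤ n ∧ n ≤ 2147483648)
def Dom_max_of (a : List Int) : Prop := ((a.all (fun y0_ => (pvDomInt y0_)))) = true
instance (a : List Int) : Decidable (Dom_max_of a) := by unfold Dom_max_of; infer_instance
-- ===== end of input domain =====

-- B replaces A's fused left-to-right running-max/counter loop with a divide-and-conquer over
-- halves (alternative decomposition, same cost); return values agree on every non-empty list.

-- ===== PORT A =====
-- A's fused loop: state (max, k), i over range(len(a)); a[i] is always in range so pyGetD is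
-- exact; a[0] raises IndexError on [], excluded by Pre_ (the getD 0 default is a dummy).
def max_of (a : List Int) : Int × Int :=
  let m0 : Int := (PySem.List.pyGet? a 0).getD 0
  (PySem.List.pyRange 0 a.length 1).foldl
    (fun (s : Int × Int) i =>
      let x := PySem.List.pyGetD a i 0
      if s.1 < x then (x, s.2 + 1) else s)
    (m0, 0)

-- ===== PORT B =====
-- rec(seg, t) of Source B; seg[:mid]/seg[mid:] become take/drop. rec is never called on []
-- (Python would recurse forever there); the [] branch below is an unreachable dummy.
def pvRec (seg : List Int) (t : Int) : Int × Int :=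
  match seg with
  | [x] => if t < x then (x, 1) else (t, 0)
  | [] => (t, 0)
  | y :: z :: zs =>
    let mid := (y :: z :: zs).length / 2
    let p1 := pvRec ((y :: z :: zs).take mid) t
    let p2 := pvRec ((y :: z :: zs).drop mid) p1.1
    (p2.1, p1.2 + p2.2)
termination_by seg.length
decreasing_by
  · simp; omega
  · simp; omega

-- a[0] raises IndexError on [], excluded by Pre_ (the getD 0 default is a dummy).
def max_of_alt (a : List Int) : Int × Int :=
  pvRec a ((PySem.List.pyGet? a 0).getD 0)

-- ===== PRECONDITION & SPEC =====
-- A (and B) raise IndexError on the empty list (a[0]); only that is excluded.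
def Pre_max_of (a : List Int) : Prop := a ≠ []
instance (a : List Int) : Decidable (Pre_max_of a) := by unfold Pre_max_of; infer_instance
def pvWitness_max_of : List Int := [3, 1, 4, 1, 5]

def Spec_max_of (a : List Int) (out : Int × Int) : Prop := out = max_of_alt a
instance (a : List Int) (out : Int × Int) : Decidable (Spec_max_of a out) := by unfold Spec_max_of; infer_instance

-- ===== CLAIM (what is proved, stated in full; the proofs are below) =====
def Claim_equal_max_of : Prop := ∀ (a : List Int), Dom_max_of a → Pre_max_of a → Spec_max_of a (max_of a)

-- ===== LEMMAS AND PROOFS =====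

-- A's loop body as a plain function of the state and the element.
def pvStep (s : Int × Int) (x : Int) : Int × Int :=
  if s.1 < x then (x, s.2 + 1) else s

-- The count component of A's fold is additive in its initial value.
theorem pvStep_fold_add (xs : List Int) : ∀ (m k : Int),
    xs.foldl pvStep (m, k) = ((xs.foldl pvStep (m, 0)).1, k + (xs.foldl pvStep (m, 0)).2) := by
  induction xs with
  | nil => intro m k; simp
  | cons y ys ih =>
    intro m k
    by_cases h : m < y
    · simp only [List.foldl_cons, pvStep, h, if_true]
      rw [ih y (k + 1), ih y (0 + 1)]
      simp only [Prod.mk.injEq]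
      exact ⟨trivial, by ring⟩
    · simp only [List.foldl_cons, pvStep, h, if_false]
      exact ih m k

-- Core invariant: B's divide-and-conquer computes exactly A's fold started at (t, 0).
theorem pvRec_eq_foldl (seg : List Int) (t : Int) (h : seg ≠ []) :
    pvRec seg t = seg.foldl pvStep (t, 0) := by
  induction seg, t using pvRec.induct with
  | case1 t x hlt => simp [pvRec, pvStep, hlt]
  | case2 t x hlt => simp [pvRec, pvStep, hlt]
  | case3 t => exact absurd rfl h
  | case4 t y z zs mid p1 ihT ihT' ihD =>
    have hp : p1 = pvRec (List.take mid (y :: z :: zs)) t := rfl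
    have hm : mid = (y :: z :: zs).length / 2 := rfl
    clear_value p1 mid
    subst hp hm
    rw [pvRec]
    have htake : (y :: z :: zs).take ((y :: z :: zs).length / 2) ≠ [] := by
      intro he
      have := congrArg List.length he
      simp at this
    have hdrop : (y :: z :: zs).drop ((y :: z :: zs).length / 2) ≠ [] := by
      intro he
      have := congrArg List.length he
      simp at this; omega
    rw [ihT htake] at ihD
    rw [ihT htake, ihD hdrop]
    conv_rhs => rw [show (y :: z :: zs) =
        (y :: z :: zs).take ((y :: z :: zs).length / 2) ++ (y :: z :: zs).drop ((y :: z :: zs).length / 2) from by simp]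
    rw [List.foldl_append]
    set L := (y :: z :: zs).take ((y :: z :: zs).length / 2)
    set R := (y :: z :: zs).drop ((y :: z :: zs).length / 2)
    have := pvStep_fold_add R (L.foldl pvStep (t, 0)).1 (L.foldl pvStep (t, 0)).2
    rw [show L.foldl pvStep (t, 0) = ((L.foldl pvStep (t, 0)).1, (L.foldl pvStep (t, 0)).2) from rfl] at this ⊢
    rw [this]

-- ===== VERDICT (by name: the statement is the Claim_ definition above) =====
theorem max_of_spec : Claim_equal_max_of := by
  unfold Claim_equal_max_of
  intro a _ hpre
  unfold Spec_max_of
  cases a with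
  | nil => exact absurd rfl hpre
  | cons x xs =>
    show max_of (x :: xs) = max_of_alt (x :: xs)
    have hinit : (PySem.List.pyGet? (x :: xs) 0).getD 0 = x := by
      simp [PySem.List.pyGet?, PySem.List.pyIdx?]
    have hA : max_of (x :: xs) = (x :: xs).foldl pvStep (x, 0) := by
      unfold max_of
      have hfold := PySem.List.foldl_pyRange_zero_pyGetD (x :: xs) (0 : Int) pvStep ((x : Int), (0 : Int))
      simp only [pvStep] at hfold
      simp only [hinit]
      simpa using hfold
    rw [hA]
    unfold max_of_alt
    rw [hinit, pvRec_eq_foldl _ _ (by simp)]
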